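-- pv_equiv track=rewrite | github.com/WilliamHunt518/GraphColouringNew | ui/human_turn_ui.py | _layout_by_node_columns
-- ===== SOURCE A (Python) =====
-- from typing import Any, Callable, Dict, List, Optional, Set, Tuple
--
-- def _layout_by_node_columns(args: List[Dict], box_width: int, box_height: int,
--                             column_spacing: int, v_spacing: int) -> Dict[int, Tuple[int, int]]:
--     """Layout arguments in columns by node.
--
--     Each node gets its own column, and arguments about that node are stacked vertically.
--     This makes it clear which arguments pertain to which node.
--
--     Returns dict mapping argument index to (x, y) position.
--     """
--     if not args:
--         return {}
--
--     # Group arguments by node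
--     node_groups = {}  # {node: [arg_indices]}
--     node_order = []  # Track order of first appearance
--
--     for idx, arg in enumerate(args):
--         node = arg.get("node")
--         if not node:
--             continue
--         if node not in node_groups:
--             node_order.append(node)
--             node_groups[node] = []
--         node_groups[node].append(idx)
--
--     # Assign columns to nodes
--     positions = {}
--     base_x = 100  # Start position
--
--     for col_idx, node in enumerate(node_order):
--         arg_indices = node_groups[node]
--         x = base_x + col_idx * column_spacing
--
--         # Stack arguments vertically in this column
--         for local_idx, arg_idx in enumerate(arg_indices):
--             y = 80 + local_idx * (box_height + v_spacing)
--             positions[arg_idx] = (x, y)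
--
--     return positions
-- ===== SOURCE B (Python) =====
-- from typing import Dict, List, Tuple
--
--
-- def _layout_by_node_columns(args: List[Dict], box_width: int, box_height: int,
--                             column_spacing: int, v_spacing: int) -> Dict[int, Tuple[int, int]]:
--     """Collect the distinct truthy nodes in first-appearance order, then build the
--     positions with one filtered scan of args per node (no grouping dict)."""
--     nodes = []
--     for arg in args:
--         n = arg.get("node")
--         if n and n not in nodes:
--             nodes.append(n)
--     return {
--         idx: (100 + col * column_spacing, 80 + row * (box_height + v_spacing))
--         for col, node in enumerate(nodes)
--         for row, idx in enumerate(
--             i for i, a in enumerate(args) if a.get("node") == node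
--         )
--     }
-- ===== Notes on version B (the rewrite author's own statement) =====
-- stated objective: simpler
-- what changed: Replaces A's dict-of-index-lists grouping pass plus a second nested loop over the groups by a short distinct-nodes scan followed by one nested comprehension that rescans args per node.
import Mathlib
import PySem

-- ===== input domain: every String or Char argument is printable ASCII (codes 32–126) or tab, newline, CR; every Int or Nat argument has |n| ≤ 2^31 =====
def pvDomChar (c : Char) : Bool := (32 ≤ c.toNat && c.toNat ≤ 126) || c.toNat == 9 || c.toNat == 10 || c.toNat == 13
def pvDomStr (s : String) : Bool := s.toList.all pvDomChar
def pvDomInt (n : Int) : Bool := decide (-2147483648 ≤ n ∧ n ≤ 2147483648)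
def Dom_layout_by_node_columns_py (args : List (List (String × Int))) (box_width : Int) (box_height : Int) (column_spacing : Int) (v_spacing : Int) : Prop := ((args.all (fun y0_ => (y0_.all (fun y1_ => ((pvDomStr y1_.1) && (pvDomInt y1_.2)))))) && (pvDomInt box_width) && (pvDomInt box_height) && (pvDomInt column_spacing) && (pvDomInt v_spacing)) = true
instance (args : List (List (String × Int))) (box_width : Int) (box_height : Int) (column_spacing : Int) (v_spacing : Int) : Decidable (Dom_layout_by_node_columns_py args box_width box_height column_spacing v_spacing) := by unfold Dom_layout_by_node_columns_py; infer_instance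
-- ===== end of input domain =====

-- B replaces A's grouping-dict pass plus nested emit loop by a distinct-nodes scan and one
-- nested comprehension rescanning args per node (objective: simpler; not faster).

-- ===== PORT A =====
-- one iteration of A's grouping loop: skip a falsy node, register a new node, append idx to its group
def pvA_step (st : List Int × PySem.Dict Int (List Int)) (p : Int × List (String × Int)) :
    List Int × PySem.Dict Int (List Int) :=
  match (PySem.Dict.mk p.2).get? "node" with
  | none => st
  | some n =>
    if n = 0 then st
    else
      let st' := if st.2.contains n then st else (st.1 ++ [n], st.2.insert n [])
      (st'.1, st'.2.modify n [] (· ++ [p.1]))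

def layout_by_node_columns_py (args : List (List (String × Int))) (box_width : Int) (box_height : Int) (column_spacing : Int) (v_spacing : Int) : List (Int × Int × Int) :=
  if args = [] then []
  else
    let st := (PySem.List.enumerate args).foldl pvA_step ([], PySem.Dict.empty)
    let positions : PySem.Dict Int (Int × Int) :=
      (PySem.List.enumerate st.1).foldl
        (fun pos q =>
          let x := 100 + q.1 * column_spacing
          (PySem.List.enumerate (st.2.getD q.2 [])).foldl
            (fun pos r => pos.insert r.2 (x, 80 + r.1 * (box_height + v_spacing))) pos)
        PySem.Dict.empty
    positions.items

-- ===== PORT B =====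
-- the distinct truthy nodes of args, in first-appearance order
def pvB_nodes (args : List (List (String × Int))) : List Int :=
  args.foldl
    (fun s arg =>
      match (PySem.Dict.mk arg).get? "node" with
      | none => s
      | some n => if n = 0 then s else if n ∈ s then s else s ++ [n])
    []

def layout_by_node_columns_py_alt (args : List (List (String × Int))) (box_width : Int) (box_height : Int) (column_spacing : Int) (v_spacing : Int) : List (Int × Int × Int) :=
  (PySem.List.enumerate (pvB_nodes args)).flatMap (fun q =>
    (PySem.List.enumerate ((PySem.List.enumerate args).filter
        (fun p => (PySem.Dict.mk p.2).get? "node" == some q.2))).map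
      (fun r => (r.2.1, 100 + q.1 * column_spacing, 80 + r.1 * (box_height + v_spacing))))

-- ===== PRECONDITION & SPEC =====
def Spec_layout_by_node_columns_py (args : List (List (String × Int))) (box_width : Int) (box_height : Int) (column_spacing : Int) (v_spacing : Int) (out : List (Int × Int × Int)) : Prop := out = layout_by_node_columns_py_alt args box_width box_height column_spacing v_spacing
instance (args : List (List (String × Int))) (box_width : Int) (box_height : Int) (column_spacing : Int) (v_spacing : Int) (out : List (Int × Int × Int)) : Decidable (Spec_layout_by_node_columns_py args box_width box_height column_spacing v_spacing out) := by unfold Spec_layout_by_node_columns_py; infer_instance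

-- ===== CLAIM (what is proved, stated in full; the proofs are below) =====
def Claim_equal_layout_by_node_columns_py : Prop := ∀ (args : List (List (String × Int))) (box_width : Int) (box_height : Int) (column_spacing : Int) (v_spacing : Int), Dom_layout_by_node_columns_py args box_width box_height column_spacing v_spacing → Spec_layout_by_node_columns_py args box_width box_height column_spacing v_spacing (layout_by_node_columns_py args box_width box_height column_spacing v_spacing)

-- ===== LEMMAS AND PROOFS =====

-- the truthy "node" value of an enumerated arg
def pvF (p : Int × List (String × Int)) : Option Int := (PySem.Dict.mk p.2).get? "node"
-- B's distinct-nodes step, lifted to enumerated pairs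
def pvNStep (s : List Int) (p : Int × List (String × Int)) : List Int :=
  match pvF p with
  | none => s
  | some n => if n = 0 then s else if n ∈ s then s else s ++ [n]
-- invariant of A's grouping loop: node_order = B's distinct-nodes fold; groups = filtered index lists
lemma pvPhase1 (l : List (Int × List (String × Int))) (ord : List Int)
    (d : PySem.Dict Int (List Int)) (hk : d.keys = ord) (hnd : ord.Nodup)
    (hnz : ∀ n ∈ ord, n ≠ 0) :
    (l.foldl pvA_step (ord, d)).1 = l.foldl pvNStep ord
    ∧ (l.foldl pvA_step (ord, d)).2.keys = l.foldl pvNStep ord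
    ∧ (l.foldl pvNStep ord).Nodup
    ∧ (∀ n ∈ l.foldl pvNStep ord, n ≠ 0)
    ∧ ∀ n : Int, n ≠ 0 → (l.foldl pvA_step (ord, d)).2.getD n [] =
        d.getD n [] ++ (l.filter (fun p => pvF p == some n)).map (·.1) := by
  induction l generalizing ord d with
  | nil => exact ⟨rfl, by simpa using hk, hnd, hnz, fun n _ => by simp⟩
  | cons p l ih =>
    have hcont : ∀ n : Int, d.contains n = decide (n ∈ ord) := by
      intro n; rw [PySem.Dict.contains_eq_decide_mem_keys, hk]
    simp only [List.foldl_cons]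
    rcases hF : pvF p with _ | n
    · have hA : pvA_step (ord, d) p = (ord, d) := by
        simp [pvA_step, show (PySem.Dict.mk p.2).get? "node" = none from hF]
      have hN : pvNStep ord p = ord := by simp [pvNStep, hF]
      rw [hA, hN]
      obtain ⟨h1, h2, h3, h4, h5⟩ := ih ord d hk hnd hnz
      refine ⟨h1, h2, h3, h4, fun m hm => ?_⟩
      rw [h5 m hm, List.filter_cons]
      simp [hF]
    · by_cases hn0 : n = 0
      · subst hn0
        have hA : pvA_step (ord, d) p = (ord, d) := by
          simp [pvA_step, show (PySem.Dict.mk p.2).get? "node" = some 0 from hF]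
        have hN : pvNStep ord p = ord := by simp [pvNStep, hF]
        rw [hA, hN]
        obtain ⟨h1, h2, h3, h4, h5⟩ := ih ord d hk hnd hnz
        refine ⟨h1, h2, h3, h4, fun m hm => ?_⟩
        rw [h5 m hm, List.filter_cons]
        have : (pvF p == some m) = false := by simp [hF]; omega
        simp [this]
      · by_cases hmem : n ∈ ord
        · have hA : pvA_step (ord, d) p = (ord, d.modify n [] (· ++ [p.1])) := by
            simp [pvA_step, show (PySem.Dict.mk p.2).get? "node" = some n from hF,
              hn0, hcont n, hmem]
          have hN : pvNStep ord p = ord := by simp [pvNStep, hF, hn0, hmem]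
          rw [hA, hN]
          have hk' : (d.modify n [] (· ++ [p.1])).keys = ord := by
            rw [PySem.Dict.keys_modify, PySem.Dict.keys_insert_of_contains]
            · exact hk
            · rw [hcont]; simp [hmem]
          obtain ⟨h1, h2, h3, h4, h5⟩ := ih ord (d.modify n [] (· ++ [p.1])) hk' hnd hnz
          refine ⟨h1, h2, h3, h4, fun m hm => ?_⟩
          rw [h5 m hm, PySem.Dict.getD_modify, List.filter_cons]
          by_cases hmn : m = n
          · subst hmn; simp [hF]
          · have : (pvF p == some m) = false := by simp [hF]; exact fun h => hmn h.symm
            simp [hmn, this]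
        · have hcf : d.contains n = false := by rw [hcont]; simp [hmem]
          have hA : pvA_step (ord, d) p
              = (ord ++ [n], (d.insert n []).modify n [] (· ++ [p.1])) := by
            simp [pvA_step, show (PySem.Dict.mk p.2).get? "node" = some n from hF,
              hn0, hcf]
          have hN : pvNStep ord p = ord ++ [n] := by simp [pvNStep, hF, hn0, hmem]
          rw [hA, hN]
          have hk' : ((d.insert n []).modify n [] (· ++ [p.1])).keys = ord ++ [n] := by
            rw [PySem.Dict.keys_modify, PySem.Dict.keys_insert_of_contains,
              PySem.Dict.keys_insert_of_not_contains _ _ hcf, hk]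
            rw [PySem.Dict.contains_insert_self]
          have hnd' : (ord ++ [n]).Nodup := by
            rw [List.nodup_append]
            exact ⟨hnd, List.nodup_singleton n, by intro a ha b hb; rw [List.mem_singleton] at hb; subst hb; exact fun h => hmem (h ▸ ha)⟩
          have hnz' : ∀ m ∈ ord ++ [n], m ≠ 0 := by
            intro m hm; rcases List.mem_append.1 hm with h | h
            · exact hnz m h
            · simp at h; omega
          obtain ⟨h1, h2, h3, h4, h5⟩ := ih (ord ++ [n]) _ hk' hnd' hnz'
          refine ⟨h1, h2, h3, h4, fun m hm => ?_⟩
          rw [h5 m hm, PySem.Dict.getD_modify, List.filter_cons]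
          by_cases hmn : m = n
          · subst hmn
            rw [PySem.Dict.getD_insert_self, PySem.Dict.getD_of_not_contains _ _ hcf]
            simp [hF]
          · have : (pvF p == some m) = false := by simp [hF]; exact fun h => hmn h.symm
            rw [PySem.Dict.getD_insert_of_ne _ _ _ hmn]
            simp [hmn, this]

-- indices of the args whose "node" value is n, in order
def pvIdxs (args : List (List (String × Int))) (n : Int) : List Int :=
  ((PySem.List.enumerate args).filter (fun p => pvF p == some n)).map (·.1)

lemma pvIdxs_nodup (args : List (List (String × Int))) (n : Int) :
    (pvIdxs args n).Nodup := by
  have h := (PySem.List.pairwise_lt_enumerate args 0).sublist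
    (List.filter_sublist (p := fun p => pvF p == some n))
  rw [pvIdxs, List.Nodup, List.pairwise_map]
  exact h.imp (fun hlt => by omega)

lemma pvIdxs_disjoint (args : List (List (String × Int))) (n m : Int) (h : n ≠ m) :
    ∀ i ∈ pvIdxs args n, i ∉ pvIdxs args m := by
  intro i hn hm
  rw [pvIdxs, List.mem_map] at hn hm
  obtain ⟨p, hpf, hp1⟩ := hn
  obtain ⟨q, hqf, hq1⟩ := hm
  rw [List.mem_filter] at hpf hqf
  obtain ⟨hpmem, hpn⟩ := hpf
  obtain ⟨hqmem, hqm⟩ := hqf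
  rw [PySem.List.mem_enumerate_iff] at hpmem hqmem
  obtain ⟨k1, hk1, rfl⟩ := hpmem
  obtain ⟨k2, hk2, rfl⟩ := hqmem
  have : k1 = k2 := by simp at hp1 hq1; omega
  subst this
  simp at hpn hqm
  rw [hpn] at hqm
  exact h (Option.some.inj hqm)

lemma pvEnumerate_map {α β : Type} (g : α → β) (xs : List α) (s : Int) :
    PySem.List.enumerate (xs.map g) s
      = (PySem.List.enumerate xs s).map (fun p => (p.1, g p.2)) := by
  induction xs generalizing s with
  | nil => simp [PySem.List.enumerate_nil]
  | cons x xs ih => simp [PySem.List.enumerate_cons, ih]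

lemma pvPhase2 (args : List (List (String × Int))) (bh cs vs : Int)
    (L : List (Int × Int)) (pos : PySem.Dict Int (Int × Int))
    (hndL : (L.map (·.2)).Nodup)
    (hfresh : ∀ q ∈ L, ∀ i ∈ pvIdxs args q.2, pos.contains i = false)
    (hknd : pos.keys.Nodup) :
    (L.foldl
      (fun pos q =>
        let x := 100 + q.1 * cs
        (PySem.List.enumerate (pvIdxs args q.2)).foldl
          (fun pos r => pos.insert r.2 (x, 80 + r.1 * (bh + vs))) pos)
      pos).items
    = pos.items ++ L.flatMap (fun q =>
        (PySem.List.enumerate (pvIdxs args q.2)).map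
          (fun r => (r.2, 100 + q.1 * cs, 80 + r.1 * (bh + vs)))) := by
  induction L generalizing pos with
  | nil => simp
  | cons q L ih =>
    simp only [List.foldl_cons]
    have hinner := PySem.Dict.items_foldl_insert_fresh
      (PySem.List.enumerate (pvIdxs args q.2)) (·.2)
      (fun r => (100 + q.1 * cs, 80 + r.1 * (bh + vs))) pos
      (by intro r hr
          apply hfresh q (List.mem_cons_self ..)
          have := congrArg (fun l => r.2 ∈ l) (PySem.List.map_snd_enumerate (pvIdxs args q.2) 0)
          simp only [eq_iff_iff] at this
          exact this.mp (List.mem_map_of_mem hr))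
      (by rw [PySem.List.map_snd_enumerate]; exact pvIdxs_nodup args q.2)
    set pos' := (PySem.List.enumerate (pvIdxs args q.2)).foldl
      (fun pos r => pos.insert r.2 (100 + q.1 * cs, 80 + r.1 * (bh + vs))) pos with hpos'
    have hkeys' : pos'.keys = pos.keys ++ pvIdxs args q.2 := by
      show pos'.items.map (·.1) = _
      rw [hinner, List.map_append, List.map_map]
      congr 1
      have : ((fun (x : Int × Int × Int) => x.1) ∘ fun (r : Int × Int) => ((r.2 : Int), (100 + q.1 * cs, 80 + r.1 * (bh + vs))))
          = fun (r : Int × Int) => r.2 := rfl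
      rw [this, PySem.List.map_snd_enumerate]
    have hndtail : (L.map (·.2)).Nodup := (List.nodup_cons.mp hndL).2
    have hqnot : q.2 ∉ L.map (·.2) := (List.nodup_cons.mp hndL).1
    have ih' := ih pos'
      hndtail
      (by intro q' hq' i hi
          rw [PySem.Dict.contains_eq_decide_mem_keys, hkeys']
          have h1 : i ∉ pos.keys := by
            have := hfresh q' (List.mem_cons_of_mem _ hq') i hi
            rw [PySem.Dict.contains_eq_decide_mem_keys] at this
            simpa using this
          have h2 : i ∉ pvIdxs args q.2 := by
            apply pvIdxs_disjoint args q'.2 q.2 _ i hi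
            intro h
            exact hqnot (h ▸ List.mem_map_of_mem hq')
          simp [h1, h2]
      )
      (by rw [hkeys', List.nodup_append]
          refine ⟨hknd, pvIdxs_nodup args q.2, ?_⟩
          intro a ha b hb
          have := hfresh q (List.mem_cons_self ..) b hb
          rw [PySem.Dict.contains_eq_decide_mem_keys] at this
          simp at this
          exact fun h => this (h ▸ ha))
    simp only at ih' ⊢
    rw [ih', hinner]
    simp [List.append_assoc]

lemma pvB_nodes_eq (args : List (List (String × Int))) :
    pvB_nodes args = (PySem.List.enumerate args).foldl pvNStep [] := by
  rw [pvB_nodes]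
  conv_lhs => rw [← PySem.List.map_snd_enumerate args 0]
  rw [List.foldl_map]
  rfl

lemma pvMain_eq (args : List (List (String × Int))) (bw bh cs vs : Int) :
    layout_by_node_columns_py args bw bh cs vs = layout_by_node_columns_py_alt args bw bh cs vs := by
  by_cases hargs : args = []
  · subst hargs
    simp [layout_by_node_columns_py, layout_by_node_columns_py_alt, pvB_nodes,
      PySem.List.enumerate_nil]
  · rw [layout_by_node_columns_py, if_neg hargs]
    obtain ⟨h1, h2, h3, h4, h5⟩ := pvPhase1 (PySem.List.enumerate args) [] PySem.Dict.empty
      (by simp) List.nodup_nil (by simp)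
    set N := (PySem.List.enumerate args).foldl pvNStep [] with hN
    set st := (PySem.List.enumerate args).foldl pvA_step ([], PySem.Dict.empty) with hst
    simp only
    rw [h1]
    -- replace the getD body by pvIdxs for every enumerated node
    have hbody : (PySem.List.enumerate N).foldl
        (fun pos q =>
          let x := 100 + q.1 * cs
          (PySem.List.enumerate (st.2.getD q.2 [])).foldl
            (fun pos r => pos.insert r.2 (x, 80 + r.1 * (bh + vs))) pos)
        PySem.Dict.empty
      = (PySem.List.enumerate N).foldl
        (fun pos q =>
          let x := 100 + q.1 * cs
          (PySem.List.enumerate (pvIdxs args q.2)).foldl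
            (fun pos r => pos.insert r.2 (x, 80 + r.1 * (bh + vs))) pos)
        PySem.Dict.empty := by
      apply PySem.List.foldl_congr_mem
      intro acc q hq
      have hq2 : q.2 ∈ N := by
        rw [PySem.List.mem_enumerate_iff] at hq
        obtain ⟨k, hk, rfl⟩ := hq
        exact List.getElem_mem hk
      have : st.2.getD q.2 [] = pvIdxs args q.2 := by
        rw [h5 q.2 (h4 q.2 hq2)]
        simp [pvIdxs]
      rw [this]
    rw [hbody]
    rw [pvPhase2 args bh cs vs (PySem.List.enumerate N) PySem.Dict.empty
      (by rw [PySem.List.map_snd_enumerate]; exact h3)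
      (by intro q _ i _; simp [PySem.Dict.contains_empty])
      (by simp [PySem.Dict.keys_empty])]
    rw [layout_by_node_columns_py_alt, pvB_nodes_eq, ← hN]
    show List.flatMap _ _ = List.flatMap _ _
    congr 1
    funext q
    rw [show ((PySem.List.enumerate args).filter
        (fun p => (PySem.Dict.mk p.2).get? "node" == some q.2))
      = ((PySem.List.enumerate args).filter (fun p => pvF p == some q.2)) from rfl]
    rw [show pvIdxs args q.2 = ((PySem.List.enumerate args).filter
        (fun p => pvF p == some q.2)).map (·.1) from rfl]
    rw [pvEnumerate_map, List.map_map]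
    rfl

-- ===== VERDICT (by name: the statement is the Claim_ definition above) =====
theorem layout_by_node_columns_py_spec : Claim_equal_layout_by_node_columns_py := by
  intro args box_width box_height column_spacing v_spacing _
  exact pvMain_eq args box_width box_height column_spacing v_spacing
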